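-- pv_equiv track=rewrite | github.com/TimilsinaBimal/neurareview | src/ai_reviewer.py | _get_file_language
-- ===== SOURCE A (Python) =====
-- def _get_file_language(filename: str) -> str:
--     """Detect programming language from filename."""
--     language_map = {
--         ".py": "Python",
--         ".js": "JavaScript",
--         ".ts": "TypeScript",
--         ".jsx": "React JSX",
--         ".tsx": "React TSX",
--         ".java": "Java",
--         ".cpp": "C++",
--         ".c": "C",
--         ".cs": "C#",
--         ".php": "PHP",
--         ".rb": "Ruby",
--         ".go": "Go",
--         ".rs": "Rust",
--         ".swift": "Swift",
--         ".kt": "Kotlin",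
--         ".scala": "Scala",
--         ".sh": "Shell",
--         ".bash": "Bash",
--         ".zsh": "Zsh",
--         ".html": "HTML",
--         ".css": "CSS",
--         ".scss": "SCSS",
--         ".sass": "Sass",
--         ".less": "Less",
--     }
--
--     for ext, lang in language_map.items():
--         if filename.lower().endswith(ext):
--             return lang
--
--     return "Unknown"
-- ===== SOURCE B (Python) =====
-- def _lang(ext: str) -> str:
--     if ext == ".py": return "Python"
--     elif ext == ".js": return "JavaScript"
--     elif ext == ".ts": return "TypeScript"
--     elif ext == ".jsx": return "React JSX"
--     elif ext == ".tsx": return "React TSX"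
--     elif ext == ".java": return "Java"
--     elif ext == ".cpp": return "C++"
--     elif ext == ".c": return "C"
--     elif ext == ".cs": return "C#"
--     elif ext == ".php": return "PHP"
--     elif ext == ".rb": return "Ruby"
--     elif ext == ".go": return "Go"
--     elif ext == ".rs": return "Rust"
--     elif ext == ".swift": return "Swift"
--     elif ext == ".kt": return "Kotlin"
--     elif ext == ".scala": return "Scala"
--     elif ext == ".sh": return "Shell"
--     elif ext == ".bash": return "Bash"
--     elif ext == ".zsh": return "Zsh"
--     elif ext == ".html": return "HTML"
--     elif ext == ".css": return "CSS"
--     elif ext == ".scss": return "SCSS"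
--     elif ext == ".sass": return "Sass"
--     elif ext == ".less": return "Less"
--     else: return "Unknown"
--
--
-- def _get_file_language(filename: str) -> str:
--     """Detect programming language from filename."""
--     name = filename.lower()
--     ext_rev = []
--     for ch in reversed(name):
--         ext_rev.append(ch)
--         if ch == '.':
--             break
--     else:
--         return "Unknown"
--     return _lang(''.join(reversed(ext_rev)))
-- ===== Notes on version B (the rewrite author's own statement) =====
-- stated objective: alternative
-- what changed: A scans all 24 dict entries testing filename.lower().endswith(ext) on each; B extracts the last-dot extension in one backward character scan that stops at the first dot, then resolves it with a direct conditional lookup, so no per-entry suffix test remains.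
import Mathlib
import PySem

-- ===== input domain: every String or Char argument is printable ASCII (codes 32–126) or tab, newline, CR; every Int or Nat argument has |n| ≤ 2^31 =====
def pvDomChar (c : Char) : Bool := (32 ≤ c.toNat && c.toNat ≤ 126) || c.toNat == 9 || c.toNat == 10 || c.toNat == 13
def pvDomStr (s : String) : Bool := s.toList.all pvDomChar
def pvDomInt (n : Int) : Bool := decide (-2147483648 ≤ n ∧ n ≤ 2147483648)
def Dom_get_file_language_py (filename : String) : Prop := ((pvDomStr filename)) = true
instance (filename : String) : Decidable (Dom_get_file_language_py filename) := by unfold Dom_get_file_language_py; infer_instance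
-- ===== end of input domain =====

-- B replaces A's 24-way endswith scan by one backward scan that collects the last-dot
-- extension, resolved by a direct conditional lookup (alternative decomposition; same values).

-- ===== PORT A =====
-- the language_map dict literal of A
def pvLangPairs : List (String × String) :=
  [(".py", "Python"), (".js", "JavaScript"), (".ts", "TypeScript"), (".jsx", "React JSX"),
   (".tsx", "React TSX"), (".java", "Java"), (".cpp", "C++"), (".c", "C"), (".cs", "C#"),
   (".php", "PHP"), (".rb", "Ruby"), (".go", "Go"), (".rs", "Rust"), (".swift", "Swift"),
   (".kt", "Kotlin"), (".scala", "Scala"), (".sh", "Shell"), (".bash", "Bash"),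
   (".zsh", "Zsh"), (".html", "HTML"), (".css", "CSS"), (".scss", "SCSS"),
   (".sass", "Sass"), (".less", "Less")]

-- 'for ext, lang in language_map.items(): if filename.lower().endswith(ext): return lang'
def pvLoopA : List (String × String) → String → String
  | [], _ => "Unknown"
  | (ext, lang) :: rest, filename =>
      if PySem.Str.endswith (PySem.Str.lower filename) ext then lang else pvLoopA rest filename

def get_file_language_py (filename : String) : String :=
  pvLoopA (PySem.Dict.ofList pvLangPairs).items filename

-- ===== PORT B =====
-- B's helper '_lang': a plain if/elif chain on the extracted extension
def pvLang (ext : String) : String :=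
  if ext = ".py" then "Python"
  else if ext = ".js" then "JavaScript"
  else if ext = ".ts" then "TypeScript"
  else if ext = ".jsx" then "React JSX"
  else if ext = ".tsx" then "React TSX"
  else if ext = ".java" then "Java"
  else if ext = ".cpp" then "C++"
  else if ext = ".c" then "C"
  else if ext = ".cs" then "C#"
  else if ext = ".php" then "PHP"
  else if ext = ".rb" then "Ruby"
  else if ext = ".go" then "Go"
  else if ext = ".rs" then "Rust"
  else if ext = ".swift" then "Swift"
  else if ext = ".kt" then "Kotlin"
  else if ext = ".scala" then "Scala"
  else if ext = ".sh" then "Shell"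
  else if ext = ".bash" then "Bash"
  else if ext = ".zsh" then "Zsh"
  else if ext = ".html" then "HTML"
  else if ext = ".css" then "CSS"
  else if ext = ".scss" then "SCSS"
  else if ext = ".sass" then "Sass"
  else if ext = ".less" then "Less"
  else "Unknown"

-- B's backward scan over reversed(name): push each char, stop inclusively at the first '.'
-- (acc holds the already-scanned chars in forward order; none = loop fell through, no dot)
def pvExtRev : List Char → List Char → Option (List Char)
  | [], _ => none
  | c :: rest, acc => if c = '.' then some ('.' :: acc) else pvExtRev rest (c :: acc)

def get_file_language_py_alt (filename : String) : String :=
  match pvExtRev (PySem.Str.lower filename).toList.reverse [] with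
  | none => "Unknown"
  | some e => pvLang (String.ofList e)

-- ===== PRECONDITION & SPEC =====
def Spec_get_file_language_py (filename : String) (out : String) : Prop := out = get_file_language_py_alt filename
instance (filename : String) (out : String) : Decidable (Spec_get_file_language_py filename out) := by unfold Spec_get_file_language_py; infer_instance

-- ===== CLAIM =====
def Claim_equal_get_file_language_py : Prop := ∀ (filename : String), Dom_get_file_language_py filename → Spec_get_file_language_py filename (get_file_language_py filename)

-- ===== LEMMAS AND PROOFS =====

lemma pv_items_ofList : (PySem.Dict.ofList pvLangPairs).items = pvLangPairs := by decide

lemma pv_exists_split (l : List Char) (h : '.' ∈ l) :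
    ∃ a b, l = a ++ '.' :: b ∧ '.' ∉ b := by
  induction l with
  | nil => cases h
  | cons c t ih =>
      by_cases ht : '.' ∈ t
      · obtain ⟨a, b, hab, hb⟩ := ih ht
        exact ⟨c :: a, b, by rw [hab, List.cons_append], hb⟩
      · have hc : c = '.' := ((List.mem_cons.mp h).resolve_right ht).symm
        exact ⟨[], t, by rw [hc, List.nil_append], ht⟩

lemma pv_suffix_iff (a b t : List Char) (hb : '.' ∉ b) (ht : '.' ∉ t) :
    ('.' :: t <:+ a ++ '.' :: b) ↔ t = b := by
  constructor
  · intro h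
    have h2 : '.' :: b <:+ a ++ '.' :: b := List.suffix_append a _
    rcases List.suffix_or_suffix_of_suffix h h2 with h3 | h3
    · rcases List.suffix_cons_iff.mp h3 with h4 | h4
      · exact (List.cons_eq_cons.mp h4).2
      · exact absurd (h4.subset (List.mem_cons_self ..)) hb
    · rcases List.suffix_cons_iff.mp h3 with h4 | h4
      · exact (List.cons_eq_cons.mp h4).2.symm
      · exact absurd (h4.subset (List.mem_cons_self ..)) ht
  · intro h; subst h; exact List.suffix_append a _

lemma pv_endswith_eq (f ext : String) (a b : List Char)
    (hl : (PySem.Str.lower f).toList = a ++ '.' :: b) (hb : '.' ∉ b)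
    (he : ext.toList = '.' :: b)
    (key : String) (hk : key.toList.head? = some '.' ∧ '.' ∉ key.toList.tail) :
    PySem.Str.endswith (PySem.Str.lower f) key = (key == ext) := by
  obtain ⟨hk1, hk2⟩ := hk
  obtain ⟨t, hkt⟩ : ∃ t, key.toList = '.' :: t := by
    cases hkey : key.toList with
    | nil => rw [hkey] at hk1; exact absurd hk1 (by simp)
    | cons c cs =>
        rw [hkey] at hk1
        simp only [List.head?_cons, Option.some.injEq] at hk1
        exact ⟨cs, by rw [hk1]⟩
  have ht : '.' ∉ t := by rw [hkt] at hk2; exact hk2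
  have lhs : PySem.Str.endswith (PySem.Str.lower f) key = true ↔ t = b := by
    rw [PySem.Str.endswith_eq, PySem.Chars.endswith_iff, hkt, hl]
    exact pv_suffix_iff a b t hb ht
  have rhs : (key == ext) = true ↔ t = b := by
    rw [beq_iff_eq]
    constructor
    · intro h
      rw [h] at hkt
      exact (List.cons_eq_cons.mp (hkt.symm.trans he)).2
    · intro h; apply String.toList_inj.mp; rw [hkt, he, h]
  rw [Bool.eq_iff_iff, lhs, rhs]

lemma pv_keys_dot : ∀ p ∈ pvLangPairs, '.' ∈ p.1.toList := by decide

lemma pv_keys_shape : ∀ p ∈ pvLangPairs, p.1.toList.head? = some '.' ∧ '.' ∉ p.1.toList.tail := by decide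

-- A's loop resolves an exact-key match the same way B's if/elif chain does
lemma pv_loop_eq_lang (f e : String)
    (h : ∀ p ∈ pvLangPairs, PySem.Str.endswith (PySem.Str.lower f) p.1 = (p.1 == e)) :
    pvLoopA pvLangPairs f = pvLang e := by
  have h1 := h (".py", "Python") (by decide)
  have h2 := h (".js", "JavaScript") (by decide)
  have h3 := h (".ts", "TypeScript") (by decide)
  have h4 := h (".jsx", "React JSX") (by decide)
  have h5 := h (".tsx", "React TSX") (by decide)
  have h6 := h (".java", "Java") (by decide)
  have h7 := h (".cpp", "C++") (by decide)
  have h8 := h (".c", "C") (by decide)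
  have h9 := h (".cs", "C#") (by decide)
  have h10 := h (".php", "PHP") (by decide)
  have h11 := h (".rb", "Ruby") (by decide)
  have h12 := h (".go", "Go") (by decide)
  have h13 := h (".rs", "Rust") (by decide)
  have h14 := h (".swift", "Swift") (by decide)
  have h15 := h (".kt", "Kotlin") (by decide)
  have h16 := h (".scala", "Scala") (by decide)
  have h17 := h (".sh", "Shell") (by decide)
  have h18 := h (".bash", "Bash") (by decide)
  have h19 := h (".zsh", "Zsh") (by decide)
  have h20 := h (".html", "HTML") (by decide)
  have h21 := h (".css", "CSS") (by decide)
  have h22 := h (".scss", "SCSS") (by decide)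
  have h23 := h (".sass", "Sass") (by decide)
  have h24 := h (".less", "Less") (by decide)
  simp only [pvLangPairs, pvLoopA, h1, h2, h3, h4, h5, h6, h7, h8, h9, h10, h11,
    h12, h13, h14, h15, h16, h17, h18, h19, h20, h21, h22, h23, h24]
  simp only [beq_iff_eq]
  simp only [pvLang, @eq_comm String e]

lemma pv_loop_unknown (f : String) : ∀ ps : List (String × String),
    (∀ p ∈ ps, PySem.Str.endswith (PySem.Str.lower f) p.1 = false) →
    pvLoopA ps f = "Unknown" := by
  intro ps
  induction ps with
  | nil => intro _; rfl
  | cons p rest ih =>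
      intro h
      obtain ⟨k, v⟩ := p
      simp only [pvLoopA, h (k, v) (List.mem_cons_self ..), Bool.false_eq_true, if_false]
      exact ih (fun p hp => h p (List.mem_cons_of_mem _ hp))

lemma pv_extRev_none (m : List Char) (h : '.' ∉ m) : ∀ acc, pvExtRev m acc = none := by
  induction m with
  | nil => intro _; rfl
  | cons c rest ih =>
      intro acc
      have hc : ¬ c = '.' := fun hc => h (hc ▸ List.mem_cons_self ..)
      simp only [pvExtRev, if_neg hc]
      exact ih (fun hm => h (List.mem_cons_of_mem _ hm)) _

lemma pv_extRev_found (m rest : List Char) (h : '.' ∉ m) :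
    ∀ acc, pvExtRev (m ++ '.' :: rest) acc = some ('.' :: (m.reverse ++ acc)) := by
  induction m with
  | nil => intro acc; simp [pvExtRev]
  | cons c tl ih =>
      intro acc
      have hc : ¬ c = '.' := fun hc => h (hc ▸ List.mem_cons_self ..)
      simp only [List.cons_append, pvExtRev, if_neg hc]
      rw [ih (fun hm => h (List.mem_cons_of_mem _ hm)) (c :: acc)]
      simp

-- ===== VERDICT =====
theorem get_file_language_py_spec : Claim_equal_get_file_language_py := by
  intro filename _
  unfold Spec_get_file_language_py get_file_language_py get_file_language_py_alt
  rw [pv_items_ofList]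
  by_cases hdot : '.' ∈ (PySem.Str.lower filename).toList
  · obtain ⟨a, b, hl, hb⟩ := pv_exists_split _ hdot
    have hrev : (PySem.Str.lower filename).toList.reverse = b.reverse ++ '.' :: a.reverse := by
      rw [hl]; simp
    have hbr : '.' ∉ b.reverse := fun hm => hb (List.mem_reverse.mp hm)
    rw [hrev, pv_extRev_found _ _ hbr []]
    simp only [List.reverse_reverse, List.append_nil]
    have he : (String.ofList ('.' :: b)).toList = '.' :: b := by simp
    exact pv_loop_eq_lang filename (String.ofList ('.' :: b))
      (fun p hp => pv_endswith_eq filename _ a b hl hb he p.1 (pv_keys_shape p hp))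
  · have hrevnone : pvExtRev (PySem.Str.lower filename).toList.reverse [] = none :=
      pv_extRev_none _ (fun hm => hdot (List.mem_reverse.mp hm)) []
    rw [hrevnone]
    apply pv_loop_unknown filename pvLangPairs
    intro p hp
    rw [Bool.eq_false_iff]
    intro hend
    rw [PySem.Str.endswith_eq] at hend
    exact hdot (((PySem.Chars.endswith_iff _ _).mp hend).subset (pv_keys_dot p hp))
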